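-- pv_equiv track=rewrite | github.com/callsys/Kosmos25Vqa_eval | kosmos2_5/models/LayoutXLM_local1d/distill/layoutlmft/data/datasets/mpdfs_full.py | repos_line
-- ===== SOURCE A (Python) =====
-- def repos_line(pos):
--     lines = []
--
--     cur_line = [pos[0]]
--     for i in range(1, len(pos)):
--         if pos[i] != pos[i - 1] + 1:
--             lines.append(cur_line)
--             cur_line = [pos[i]]
--         else:
--             cur_line.append(pos[i])
--     if len(cur_line) != 0:
--         lines.append(cur_line)
--
--     for i in range(len(lines)):
--         sub_num = lines[i][0] - 2
--         assert sub_num >= 0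
--         for j in range(len(lines[i])):
--             lines[i][j] -= sub_num
--         assert lines[i][0] >= 2
--
--     res = []
--     for line in lines:
--         res += line
--     assert len(res) == len(pos)
--     return res
-- ===== SOURCE B (Python) =====
-- def repos_line(pos):
--     res = []
--     prev = None
--     offset = 0
--     for p in pos:
--         if prev is None or p != prev + 1:
--             assert p >= 2
--             offset = 0
--         res.append(offset + 2)
--         offset += 1
--         prev = p
--     return res
-- ===== Notes on version B (the rewrite author's own statement) =====
-- stated objective: simpler
-- what changed: One pass maintaining only an in-run offset counter that directly emits offset+2 per element, instead of building a list of run lists, rebasing each run in place and concatenating.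
import Mathlib
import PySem

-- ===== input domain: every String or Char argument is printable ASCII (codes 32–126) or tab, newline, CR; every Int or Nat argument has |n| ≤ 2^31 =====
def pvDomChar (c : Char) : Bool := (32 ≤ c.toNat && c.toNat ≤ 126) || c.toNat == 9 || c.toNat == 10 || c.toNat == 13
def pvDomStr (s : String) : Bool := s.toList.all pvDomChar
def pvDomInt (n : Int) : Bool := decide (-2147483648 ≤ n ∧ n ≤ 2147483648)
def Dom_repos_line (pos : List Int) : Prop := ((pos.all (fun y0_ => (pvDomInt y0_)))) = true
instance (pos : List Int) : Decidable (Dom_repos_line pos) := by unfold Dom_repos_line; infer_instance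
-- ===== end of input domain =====

-- B replaces A's three phases (group runs into lists, rebase each, concatenate) by one pass
-- keeping only an in-run offset counter (objective: simpler); equivalence is about the return value.


-- ===== PORT A =====
-- A's first loop: state (lines, cur_line, pos[i-1]); branches in source order.
def reposStepA (st : List (List Int) × List Int × Int) (p : Int) :
    List (List Int) × List Int × Int :=
  if p ≠ st.2.2 + 1 then (st.1 ++ [st.2.1], [p], p) else (st.1, st.2.1 ++ [p], p)

-- A's rebase of one line: subtract sub_num = line[0] - 2 from every element
-- (the asserts on sub_num / line[0] are excluded by Pre_repos_line).
def reposRebaseA (line : List Int) : List Int :=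
  line.map (fun x => x - (line.headD 0 - 2))

def repos_line (pos : List Int) : List Int :=
  match pos with
  | [] => []  -- pos[0] raises IndexError in Python; excluded by Pre_repos_line
  | p0 :: rest =>
    let st := rest.foldl reposStepA ([], [p0], p0)
    let lines := if st.2.1 ≠ [] then st.1 ++ [st.2.1] else st.1
    ((lines.map reposRebaseA).flatten)  -- res += line, line after line

-- ===== PORT B =====
-- B's single pass: state (res, prev, offset); the run-start 'assert p >= 2' is excluded by Pre_repos_line.
def reposStepB (st : List Int × Option Int × Int) (p : Int) :
    List Int × Option Int × Int :=
  let off : Int :=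
    if (match st.2.1 with | none => true | some q => decide (p ≠ q + 1)) then 0 else st.2.2
  (st.1 ++ [off + 2], some p, off + 1)

def repos_line_alt (pos : List Int) : List Int :=
  (pos.foldl reposStepB ([], none, 0)).1

-- ===== PRECONDITION & SPEC =====
-- Pre_ = exactly where Python A returns: pos nonempty (else IndexError) and every run start ≥ 2,
-- i.e. the first element and every element not extending its predecessor's run (else AssertionError).
def Pre_repos_line (pos : List Int) : Prop :=
  pos ≠ [] ∧ pos.headD 0 ≥ 2 ∧ List.IsChain (fun a b => b = a + 1 ∨ b ≥ 2) pos
instance (pos : List Int) : Decidable (Pre_repos_line pos) := by unfold Pre_repos_line; infer_instance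
def pvWitness_repos_line : List Int := [2, 3, 4, 7, 8, 2]
def Spec_repos_line (pos : List Int) (out : List Int) : Prop := out = repos_line_alt pos
instance (pos : List Int) (out : List Int) : Decidable (Spec_repos_line pos out) := by unfold Spec_repos_line; infer_instance

-- ===== CLAIM (what is proved, stated in full; the proofs are below) =====
def Claim_equal_repos_line : Prop := ∀ (pos : List Int), Dom_repos_line pos → Pre_repos_line pos → Spec_repos_line pos (repos_line pos)

-- ===== LEMMAS AND PROOFS =====

-- the consecutive run [s, s+1, …, s+n-1]
def pvRun (s : Int) (n : Nat) : List Int := (List.range n).map (fun k => s + k)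

-- B's output for one run of length n
def pvOut (n : Nat) : List Int := (List.range n).map (fun k => (k : Int) + 2)

theorem pvRun_ne_nil (s : Int) (n : Nat) (h : 0 < n) : pvRun s n ≠ [] := by
  cases n with
  | zero => omega
  | succ m => simp [pvRun, List.range_succ_eq_map]

theorem pvRun_headD (s : Int) (n : Nat) (h : 0 < n) : (pvRun s n).headD 0 = s := by
  cases n with
  | zero => omega
  | succ m => simp [pvRun, List.range_succ_eq_map]

theorem pvRun_snoc (s : Int) (n : Nat) :
    pvRun s n ++ [s + (n : Int) - 1 + 1] = pvRun s (n + 1) := by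
  have : s + (n : Int) - 1 + 1 = s + (n : Int) := by ring
  rw [this]
  simp [pvRun, List.range_succ]

theorem pvOut_snoc (n : Nat) : pvOut n ++ [(n : Int) + 2] = pvOut (n + 1) := by
  simp [pvOut, List.range_succ]

theorem pvRebase_run (s : Int) (n : Nat) (h : 0 < n) :
    reposRebaseA (pvRun s n) = pvOut n := by
  unfold reposRebaseA
  rw [pvRun_headD s n h]
  unfold pvRun pvOut
  rw [List.map_map]
  refine List.map_congr_left (fun k _ => ?_)
  simp only [Function.comp]
  ring

-- main invariant: after any prefix, A's pending state (completed lines, current run, previous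
-- element) corresponds to B's state (emitted output, previous element, in-run offset)
theorem pv_main (rest : List Int) : ∀ (lines : List (List Int)) (s : Int) (n : Nat), 0 < n →
    (let st := rest.foldl reposStepA (lines, pvRun s n, s + (n : Int) - 1)
     ((if st.2.1 ≠ [] then st.1 ++ [st.2.1] else st.1).map reposRebaseA).flatten)
    = (rest.foldl reposStepB
        ((lines.map reposRebaseA).flatten ++ pvOut n, some (s + (n : Int) - 1), (n : Int))).1 := by
  induction rest with
  | nil =>
    intro lines s n hn
    simp [pvRun_ne_nil s n hn, pvRebase_run s n hn]
  | cons p rest ih =>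
    intro lines s n hn
    by_cases hp : p = s + (n : Int) - 1 + 1
    · -- run continues: p is the successor of the previous element
      have hstepA : reposStepA (lines, pvRun s n, s + (n : Int) - 1) p
          = (lines, pvRun s (n + 1), s + ((n + 1 : Nat) : Int) - 1) := by
        subst hp
        unfold reposStepA
        rw [if_neg (by simp)]
        rw [show (lines, pvRun s n, s + (n : Int) - 1).1 = lines from rfl]
        rw [show (lines, pvRun s n, s + (n : Int) - 1).2.1 = pvRun s n from rfl]
        rw [pvRun_snoc, show s + (n : Int) - 1 + 1 = s + ((n + 1 : Nat) : Int) - 1 by push_cast; ring]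
      have hstepB : reposStepB
          ((lines.map reposRebaseA).flatten ++ pvOut n, some (s + (n : Int) - 1), (n : Int)) p
          = ((lines.map reposRebaseA).flatten ++ pvOut (n + 1),
              some (s + ((n + 1 : Nat) : Int) - 1), ((n + 1 : Nat) : Int)) := by
        simp [reposStepB, hp, List.append_assoc, ← pvOut_snoc]
        omega
      rw [List.foldl_cons, List.foldl_cons, hstepA, hstepB]
      exact ih lines s (n + 1) (by omega)
    · -- new run starts at p
      have hstepA : reposStepA (lines, pvRun s n, s + (n : Int) - 1) p
          = (lines ++ [pvRun s n], pvRun p 1, p + ((1 : Nat) : Int) - 1) := by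
        unfold reposStepA
        rw [if_pos (by simpa using hp)]
        rw [show (lines, pvRun s n, s + (n : Int) - 1).1 = lines from rfl]
        rw [show (lines, pvRun s n, s + (n : Int) - 1).2.1 = pvRun s n from rfl]
        rw [show ([p] : List Int) = pvRun p 1 by simp [pvRun, List.range_succ]]
        exact congrArg (fun t => (lines ++ [pvRun s n], pvRun p 1, t)) (by push_cast; omega)
      have hstepB : reposStepB
          ((lines.map reposRebaseA).flatten ++ pvOut n, some (s + (n : Int) - 1), (n : Int)) p
          = (((lines ++ [pvRun s n]).map reposRebaseA).flatten ++ pvOut 1,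
              some (p + ((1 : Nat) : Int) - 1), ((1 : Nat) : Int)) := by
        unfold reposStepB
        rw [if_pos (by simp; omega)]
        simp [pvRebase_run s n hn, pvOut, List.range_succ]
      rw [List.foldl_cons, List.foldl_cons, hstepA, hstepB]
      exact ih (lines ++ [pvRun s n]) p 1 (by omega)

-- ===== VERDICT (by name: the statement is the Claim_ definition above) =====
theorem repos_line_spec : Claim_equal_repos_line := by
  intro pos _ hpre
  unfold Spec_repos_line
  cases pos with
  | nil => exact absurd rfl hpre.1
  | cons p0 rest =>
    have hinit : (([] : List (List Int)), [p0], p0)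
        = (([] : List (List Int)), pvRun p0 1, p0 + ((1 : Nat) : Int) - 1) := by
      rw [show ([p0] : List Int) = pvRun p0 1 by simp [pvRun, List.range_succ]]
      exact congrArg (fun t => (([] : List (List Int)), pvRun p0 1, t)) (by push_cast; omega)
    have hB : reposStepB ([], none, 0) p0
        = ((([] : List (List Int)).map reposRebaseA).flatten ++ pvOut 1,
            some (p0 + ((1 : Nat) : Int) - 1), ((1 : Nat) : Int)) := by
      simp [reposStepB, pvOut, List.range_succ]
    simp only [repos_line, repos_line_alt, List.foldl_cons, hB, hinit]
    exact pv_main rest [] p0 1 (by omega)
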